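-- pv_equiv track=rewrite | github.com/eloyekunle/python_snippets | find_increase.py | find_increase
-- ===== SOURCE A (Python) =====
-- def find_increase(numbers):
--     increases = []
--     length = len(numbers)
--     for i in range(1, length):
--         summation = 0
--         for j in range(i):
--             summation += numbers[j]
--         if numbers[i] > summation:
--             increases.append(numbers[i])
--
--     return increases
-- ===== SOURCE B (Python) =====
-- def find_increase(numbers):
--     if not numbers:
--         return []
--     increases = []
--     prefix = numbers[0]
--     for x in numbers[1:]:
--         if x > prefix:
--             increases.append(x)
--         prefix += x
--     return increases
-- ===== Notes on version B (the rewrite author's own statement) =====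
-- stated objective: faster
-- what changed: B keeps a running prefix sum in a single pass instead of recomputing the sum of all preceding elements with an inner loop for every index.
import Mathlib
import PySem

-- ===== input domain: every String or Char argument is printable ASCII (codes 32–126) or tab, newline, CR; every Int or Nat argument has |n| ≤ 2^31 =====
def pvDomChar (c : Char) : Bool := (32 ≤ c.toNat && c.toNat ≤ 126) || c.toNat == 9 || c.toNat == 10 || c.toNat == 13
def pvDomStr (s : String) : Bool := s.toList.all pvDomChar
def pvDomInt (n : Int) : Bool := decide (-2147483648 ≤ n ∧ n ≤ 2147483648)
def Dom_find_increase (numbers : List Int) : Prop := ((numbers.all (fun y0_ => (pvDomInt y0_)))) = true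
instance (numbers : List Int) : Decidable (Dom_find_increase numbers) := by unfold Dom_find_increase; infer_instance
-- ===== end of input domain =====

-- B replaces A's quadratic recomputation of the preceding-elements sum with a single pass
-- carrying a running prefix sum (objective: faster, asymptotic).


-- ===== PORT A =====
-- indices produced by range(1, len) / range(i) are always in bounds, so numbers[j] is pyGetD with an unreachable default
def find_increase (numbers : List Int) : List Int :=
  (PySem.List.pyRange 1 numbers.length 1).foldl
    (fun increases i =>
      let summation :=
        (PySem.List.pyRange 0 i 1).foldl (fun s j => s + PySem.List.pyGetD numbers j 0) 0
      if PySem.List.pyGetD numbers i 0 > summation then increases ++ [PySem.List.pyGetD numbers i 0]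
      else increases)
    []

-- ===== PORT B =====
-- the loop 'for x in numbers[1:]' with accumulators (increases, prefix), as structural recursion
def fiGo (prefix_ : Int) : List Int → List Int
  | [] => []
  | x :: xs => if x > prefix_ then x :: fiGo (prefix_ + x) xs else fiGo (prefix_ + x) xs

def find_increase_alt (numbers : List Int) : List Int :=
  match numbers with
  | [] => []
  | h :: t => fiGo h t

-- ===== PRECONDITION & SPEC =====
def Spec_find_increase (numbers : List Int) (out : List Int) : Prop := out = find_increase_alt numbers
instance (numbers : List Int) (out : List Int) : Decidable (Spec_find_increase numbers out) := by unfold Spec_find_increase; infer_instance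

-- ===== CLAIM (what is proved, stated in full; the proofs are below) =====
def Claim_equal_find_increase : Prop := ∀ (numbers : List Int), Dom_find_increase numbers → Spec_find_increase numbers (find_increase numbers)

-- ===== LEMMAS AND PROOFS =====

-- the inner loop of A sums the first i elements
lemma fi_inner_sum (numbers : List Int) (i : Int) (hi : 0 ≤ i) (hin : i ≤ (numbers.length : Int)) :
    (PySem.List.pyRange 0 i 1).foldl (fun s j => s + PySem.List.pyGetD numbers j 0) 0
      = (numbers.take i.toNat).sum := by
  have hcong : (PySem.List.pyRange 0 i 1).foldl (fun s j => s + PySem.List.pyGetD numbers j 0) 0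
      = (PySem.List.pyRange 0 ((numbers.take i.toNat).length : Int) 1).foldl
          (fun s j => s + PySem.List.pyGetD (numbers.take i.toNat) j 0) 0 := by
    have hlen : ((numbers.take i.toNat).length : Int) = i := by
      simp [List.length_take]
      omega
    rw [hlen]
    refine PySem.List.foldl_congr_mem _ _ _ _ ?_
    intro acc j hj
    have hj' := (PySem.List.mem_pyRange_one).1 hj
    have h0j : 0 ≤ j := hj'.1
    have hji : j < i := hj'.2
    congr 1
    rw [PySem.List.pyGetD_of_nonneg _ _ h0j, PySem.List.pyGetD_of_nonneg _ _ h0j]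
    rw [List.getD_eq_getElem?_getD, List.getD_eq_getElem?_getD, List.getElem?_take]
    have : j.toNat < i.toNat := by omega
    simp [this]
  rw [hcong]
  have := PySem.List.foldl_pyRange_zero_pyGetD (numbers.take i.toNat) 0
    (fun (s x : Int) => s + x) 0
  simp only [PySem.List.len] at this ⊢
  rw [this]
  rw [List.sum_eq_foldl]

-- B's loop on a snoc
lemma fiGo_snoc (t : List Int) (s x : Int) :
    fiGo s (t ++ [x]) = fiGo s t ++ (if x > s + t.sum then [x] else []) := by
  induction t generalizing s with
  | nil => simp [fiGo]
  | cons y ys ih =>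
      simp only [List.cons_append, fiGo, ih]
      by_cases h : y > s
      · simp [h, List.sum_cons, add_assoc]
      · simp [h, List.sum_cons, add_assoc]

-- A on a snoc
lemma find_increase_snoc (xs : List Int) (x : Int) (hxs : xs ≠ []) :
    find_increase (xs ++ [x]) = find_increase xs ++ (if x > xs.sum then [x] else []) := by
  unfold find_increase
  have hlen : ((xs ++ [x]).length : Int) = (xs.length : Int) + 1 := by simp
  have hpos : (1 : Int) ≤ (xs.length : Int) := by
    have : xs.length ≠ 0 := by simpa [List.length_eq_zero_iff] using hxs
    omega
  rw [hlen, PySem.List.pyRange_one_succ_right hpos, List.foldl_append]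
  -- the first part of the fold only looks at indices < xs.length, where xs ++ [x] agrees with xs
  have hbody : (PySem.List.pyRange 1 (xs.length : Int) 1).foldl
      (fun increases i =>
        let summation :=
          (PySem.List.pyRange 0 i 1).foldl (fun s j => s + PySem.List.pyGetD (xs ++ [x]) j 0) 0
        if PySem.List.pyGetD (xs ++ [x]) i 0 > summation then increases ++ [PySem.List.pyGetD (xs ++ [x]) i 0]
        else increases) []
      = (PySem.List.pyRange 1 (xs.length : Int) 1).foldl
      (fun increases i =>
        let summation :=
          (PySem.List.pyRange 0 i 1).foldl (fun s j => s + PySem.List.pyGetD xs j 0) 0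
        if PySem.List.pyGetD xs i 0 > summation then increases ++ [PySem.List.pyGetD xs i 0]
        else increases) [] := by
    refine PySem.List.foldl_congr_mem _ _ _ _ ?_
    intro acc i hi
    have hi' := (PySem.List.mem_pyRange_one).1 hi
    have h0i : 0 ≤ i := by omega
    have hget : ∀ j : Int, 0 ≤ j → j < (xs.length : Int) →
        PySem.List.pyGetD (xs ++ [x]) j 0 = PySem.List.pyGetD xs j 0 := by
      intro j h0 hlt
      rw [PySem.List.pyGetD_of_nonneg _ _ h0, PySem.List.pyGetD_of_nonneg _ _ h0]
      rw [List.getD_eq_getElem?_getD, List.getD_eq_getElem?_getD, List.getElem?_append_left]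
      omega
    have hsum : (PySem.List.pyRange 0 i 1).foldl (fun s j => s + PySem.List.pyGetD (xs ++ [x]) j 0) 0
        = (PySem.List.pyRange 0 i 1).foldl (fun s j => s + PySem.List.pyGetD xs j 0) 0 := by
      refine PySem.List.foldl_congr_mem _ _ _ _ ?_
      intro acc2 j hj
      have hj' := (PySem.List.mem_pyRange_one).1 hj
      rw [hget j hj'.1 (by omega)]
    simp only [hsum, hget i h0i hi'.2]
  rw [hbody]
  -- the last step handles index xs.length
  simp only [List.foldl_cons, List.foldl_nil]
  have hgetlast : PySem.List.pyGetD (xs ++ [x]) (xs.length : Int) 0 = x := by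
    rw [PySem.List.pyGetD_of_nonneg _ _ (by positivity)]
    simp
  have hsumlast : (PySem.List.pyRange 0 (xs.length : Int) 1).foldl
      (fun s j => s + PySem.List.pyGetD (xs ++ [x]) j 0) 0 = xs.sum := by
    have hcong : (PySem.List.pyRange 0 (xs.length : Int) 1).foldl
        (fun s j => s + PySem.List.pyGetD (xs ++ [x]) j 0) 0
        = (PySem.List.pyRange 0 (xs.length : Int) 1).foldl
        (fun s j => s + PySem.List.pyGetD xs j 0) 0 := by
      refine PySem.List.foldl_congr_mem _ _ _ _ ?_
      intro acc j hj
      have hj' := (PySem.List.mem_pyRange_one).1 hj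
      congr 1
      rw [PySem.List.pyGetD_of_nonneg _ _ hj'.1, PySem.List.pyGetD_of_nonneg _ _ hj'.1]
      rw [List.getD_eq_getElem?_getD, List.getD_eq_getElem?_getD, List.getElem?_append_left]
      omega
    rw [hcong]
    have := fi_inner_sum xs (xs.length : Int) (by positivity) (le_refl _)
    simpa using this
  rw [hgetlast, hsumlast]
  by_cases h : x > xs.sum
  · simp [h]
  · simp [h]

lemma find_increase_single (x : Int) : find_increase [x] = [] := by
  unfold find_increase
  simp [PySem.List.pyRange_one_eq_nil]

lemma fi_eq (xs : List Int) : find_increase xs = find_increase_alt xs := by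
  induction xs using List.reverseRecOn with
  | nil => rfl
  | append_singleton ys y ih =>
      cases ys with
      | nil => simp [find_increase_single, find_increase_alt, fiGo]
      | cons h t =>
          rw [find_increase_snoc (h :: t) y (by simp), ih]
          show _ = find_increase_alt ((h :: t) ++ [y])
          simp only [find_increase_alt, List.cons_append]
          rw [fiGo_snoc]
          simp [List.sum_cons]

-- ===== VERDICT (by name: the statement is the Claim_ definition above) =====
theorem find_increase_spec : Claim_equal_find_increase := by
  intro numbers _
  unfold Spec_find_increase
  exact fi_eq numbers
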